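-- pv_equiv track=rewrite | github.com/MangeshM07/GFG_Python | cdility/exampl1.py | solution
-- ===== SOURCE A (Python) =====
-- def solution(A):
--     # write your code in Python 3.6
--     count = 0
--     j=0
--     for i in range(0,len(A)):
--         j=i+1
--         for j in range(0,len(A)):
--             if A[i] == A[j]:
--                 count += 1
--     return count
-- ===== SOURCE B (Python) =====
-- from collections import Counter
--
-- def solution(A):
--     # Count ordered pairs (i, j) with A[i] == A[j] (including i == j):
--     # sum of squared frequencies.
--     return sum(c * c for c in Counter(A).values())
-- ===== Notes on version B (the rewrite author's own statement) =====
-- stated objective: faster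
-- what changed: Replaces the doubly nested index scan with a single frequency count (collections.Counter) and returns the sum of squared frequencies.
import Mathlib
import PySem

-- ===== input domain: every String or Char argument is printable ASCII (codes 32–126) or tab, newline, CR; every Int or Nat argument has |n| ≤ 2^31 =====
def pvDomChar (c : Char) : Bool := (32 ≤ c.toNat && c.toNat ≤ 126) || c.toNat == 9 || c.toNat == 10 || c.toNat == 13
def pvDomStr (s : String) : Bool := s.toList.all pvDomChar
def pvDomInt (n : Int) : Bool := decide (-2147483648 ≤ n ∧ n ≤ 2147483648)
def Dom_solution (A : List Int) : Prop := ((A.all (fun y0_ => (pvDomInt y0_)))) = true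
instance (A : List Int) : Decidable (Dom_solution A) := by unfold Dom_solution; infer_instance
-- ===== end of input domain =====

-- B replaces A's O(n^2) nested index scan with a single Counter pass summing squared frequencies (measured faster, asymptotic).


-- ===== PORT A =====
-- 'for i in range(0,len(A)): j=i+1; for j in range(0,len(A)): if A[i]==A[j]: count+=1'
-- (the assignment 'j=i+1' is dead: the inner for immediately rebinds j and j is never read, so only count is carried)
def solution (A : List Int) : Int :=
  (PySem.List.pyRange 0 (A.length : Int) 1).foldl
    (fun (count : Int) i =>
      (PySem.List.pyRange 0 (A.length : Int) 1).foldl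
        (fun (count2 : Int) j =>
          if PySem.List.pyGetD A i 0 = PySem.List.pyGetD A j 0 then count2 + 1 else count2)
        count)
    0

-- ===== PORT B =====
-- sum(c*c for c in Counter(A).values())
def solution_alt (A : List Int) : Int :=
  ((PySem.Dict.counter A).values.map (fun c => c * c)).sum

-- ===== PRECONDITION & SPEC =====
def Spec_solution (A : List Int) (out : Int) : Prop := out = solution_alt A
instance (A : List Int) (out : Int) : Decidable (Spec_solution A out) := by unfold Spec_solution; infer_instance

-- ===== CLAIM (what is proved, stated in full; the proofs are below) =====
def Claim_equal_solution : Prop := ∀ (A : List Int), Dom_solution A → Spec_solution A (solution A)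

-- ===== LEMMAS AND PROOFS =====

-- A equals the sum, over all elements x of A (with multiplicity), of the number of positions equal to x.
theorem solution_eq_sum_counts (A : List Int) :
    solution A = (A.map (fun x => (A.count x : Int))).sum := by
  unfold solution
  have hlen : (A.length : Int) = PySem.List.len A := by simp [PySem.List.len_eq]
  rw [hlen]
  rw [PySem.List.foldl_pyRange_zero_pyGetD A 0
      (fun count x =>
        (PySem.List.pyRange 0 (PySem.List.len A)).foldl
          (fun count2 j => if x = PySem.List.pyGetD A j 0 then count2 + 1 else count2) count) 0]
  have hinner : ∀ (x : Int) (c : Int),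
      (PySem.List.pyRange 0 (PySem.List.len A)).foldl
        (fun count2 j => if x = PySem.List.pyGetD A j 0 then count2 + 1 else count2) c
      = c + (A.count x : Int) := by
    intro x c
    rw [PySem.List.foldl_pyRange_zero_pyGetD A 0
        (fun count2 y => if x = y then count2 + 1 else count2) c]
    have := PySem.List.foldl_count_if (fun y => decide (x = y)) A c
    simp only [decide_eq_true_eq] at this
    rw [this, List.count_eq_countP]
    congr 1
    exact_mod_cast List.countP_congr (fun y _ => by simp only [decide_eq_true_eq, beq_iff_eq]; exact eq_comm)
  calc A.foldl
        (fun count x =>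
          (PySem.List.pyRange 0 (PySem.List.len A)).foldl
            (fun count2 j => if x = PySem.List.pyGetD A j 0 then count2 + 1 else count2) count) 0
      = A.foldl (fun count x => count + (A.count x : Int)) 0 := by
        apply PySem.List.foldl_congr_mem
        intro c x _
        exact hinner x c
    _ = (A.map (fun x => (A.count x : Int))).sum := by
        have := PySem.List.foldl_add (fun x => (A.count x : Int)) (l := A) (a := 0)
        simpa using this

-- B equals the sum of squared counts over the distinct elements of A.
theorem solution_alt_eq_sum_sq (A : List Int) :
    solution_alt A = ((PySem.List.dedup A).map (fun k => (A.count k : Int) * (A.count k : Int))).sum := by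
  unfold solution_alt
  rw [show (PySem.Dict.counter A).values = (PySem.Dict.counter A).items.map Prod.snd from rfl]
  rw [PySem.Dict.items_counter]
  rw [PySem.List.dedup_eq_ofList]
  simp [List.map_map, Function.comp_def]

-- the grouping identity: ∑_{x∈A} count x = ∑_{k distinct} (count k)²
theorem sum_counts_eq_sum_sq (A : List Int) :
    (A.map (fun x => (A.count x : Int))).sum
      = ((PySem.List.dedup A).map (fun k => (A.count k : Int) * (A.count k : Int))).sum := by
  rw [Finset.sum_list_map_count A (fun x => (A.count x : Int))]
  rw [← List.sum_toFinset (fun k => (A.count k : Int) * (A.count k : Int)) (PySem.List.nodup_dedup A)]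
  have hfin : (PySem.List.dedup A).toFinset = A.toFinset := by
    ext x; simp
  rw [hfin]
  apply Finset.sum_congr rfl
  intro m _
  simp

-- ===== VERDICT (by name: the statement is the Claim_ definition above) =====
theorem solution_spec : Claim_equal_solution := by
  intro A _
  unfold Spec_solution
  rw [solution_eq_sum_counts, solution_alt_eq_sum_sq, sum_counts_eq_sum_sq]
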